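-- pv_equiv track=rewrite | github.com/dkvlko/Dheeraj-AI-programs-github | liv_code/Data-Processing-ForMoodle-TABText/processors/english_2.py | process_cloze_backup
-- ===== SOURCE A (Python) =====
-- def process_cloze_backup(data):
--
--     START_TOKEN = "{{c1::"
--     END_TOKEN = "}}"
--     BLANK_TOKEN = "$Blankspace$"
--
--     if not data:
--         return data
--
--     header = data[0]
--
--     # Track which answer headers are already added
--     existing_headers = set(header)
--
--     # ---- Process data rows (skip header) ----
--     for row in data[1:]:
--
--         answers = []
--
--         for col_index, cell in enumerate(row):
--
--             if START_TOKEN in cell: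
--
--                 while START_TOKEN in cell:
--                     start = cell.find(START_TOKEN)
--                     end = cell.find(END_TOKEN, start)
--
--                     if end == -1:
--                         break  # malformed cloze
--
--                     # Extract answer
--                     answer = cell[start + len(START_TOKEN):end]
--                     answers.append(answer)
--
--                     # Replace cloze with blank token
--                     cell = (
--                         cell[:start]
--                         + BLANK_TOKEN
--                         + cell[end + len(END_TOKEN):]
--                     )
--
--                 row[col_index] = cell
--
--         # Append extracted answers to row
--         if answers:
--             row.extend(answers)
--
--             # Add headers if not already present
--             for i in range(len(answers)):
--                 header_name = f"{len(header) + i}Ans"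
--                 if header_name not in existing_headers:
--                     header.append(header_name)
--                     existing_headers.add(header_name)
--
--     return data
-- ===== SOURCE B (Python) =====
-- def _scan(cell):
--     # One forward pass: jump between cloze tokens, collecting parts and answers.
--     parts = []
--     answers = []
--     i = 0
--     while True:
--         start = cell.find("{{c1::", i)
--         if start == -1:
--             parts.append(cell[i:])
--             break
--         end = cell.find("}}", start + 6)
--         if end == -1:
--             parts.append(cell[i:])
--             break
--         parts.append(cell[i:start])
--         parts.append("$Blankspace$")
--         answers.append(cell[start + 6:end])
--         i = end + 2
--     return "".join(parts), answers
--
--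
-- def process_cloze_backup(data):
--     if not data:
--         return data
--
--     header = data[0]
--     existing_headers = set(header)
--
--     for row in data[1:]:
--         scanned = [_scan(cell) for cell in row]
--         answers = [a for _, ans in scanned for a in ans]
--         row[:] = [new_cell for new_cell, _ in scanned]
--
--         if answers:
--             row.extend(answers)
--             for i in range(len(answers)):
--                 header_name = f"{len(header) + i}Ans"
--                 if header_name not in existing_headers:
--                     header.append(header_name)
--                     existing_headers.add(header_name)
--
--     return data
-- ===== Notes on version B (the rewrite author's own statement) =====
-- stated objective: alternative
-- what changed: Per cell, A repeatedly re-tests containment, re-finds the token from the start and rebuilds the whole string each iteration (stateful in-place loops); B extracts all answers in one forward scan that jumps from token to token accumulating output parts, and rebuilds each row by map+flatten.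
import Mathlib
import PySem

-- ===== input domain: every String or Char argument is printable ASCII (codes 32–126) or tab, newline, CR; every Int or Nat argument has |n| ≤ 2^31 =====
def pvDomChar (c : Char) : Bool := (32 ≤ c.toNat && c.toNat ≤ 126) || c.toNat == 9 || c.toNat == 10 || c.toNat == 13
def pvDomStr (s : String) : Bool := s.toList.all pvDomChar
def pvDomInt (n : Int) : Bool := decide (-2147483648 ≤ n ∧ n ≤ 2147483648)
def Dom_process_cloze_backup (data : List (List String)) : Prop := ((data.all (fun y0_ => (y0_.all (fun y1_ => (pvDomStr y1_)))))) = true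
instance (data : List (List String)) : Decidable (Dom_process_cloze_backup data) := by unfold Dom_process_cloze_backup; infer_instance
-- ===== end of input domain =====

-- B replaces A's per-cell `while token in cell` loop (re-find from the start and rebuild the
-- whole string each iteration, in-place row/answer state) by one forward scan per cell that
-- jumps from token to token accumulating parts, rows rebuilt by map+flatten; return-value
-- equivalence only (the Python A mutates `data`'s rows/header in place; B mutates the same way).

-- shared string-scanning primitives (hand ports of Python str ops, exact on List Char):
-- pvFindSub t cs = cs.find(t) as an Option-valued index (Python's -1 = none)
def pvT : List Char := ['{', '{', 'c', '1', ':', ':']        -- "{{c1::"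
def pvE : List Char := ['}', '}']                            -- "}}"
def pvBLANK : List Char := ['$', 'B', 'l', 'a', 'n', 'k', 's', 'p', 'a', 'c', 'e', '$']  -- "$Blankspace$"

def pvFindSub (t : List Char) : List Char → Option Nat
  | [] => if t.isPrefixOf ([] : List Char) then some 0 else none
  | c :: r => if t.isPrefixOf (c :: r) then some 0 else (pvFindSub t r).map (· + 1)

-- the header-extension loop `for i in range(len(answers)): ...` (textually identical in A and B)
def pvExtendHeader : List String → PySem.Set String → Nat → Nat → (List String × PySem.Set String)
  | header, ex, 0, _ => (header, ex)
  | header, ex, m + 1, i =>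
    let name := PySem.Int.toStr ((header.length : Int) + (i : Int)) ++ "Ans"
    if PySem.Set.contains ex name then pvExtendHeader header ex m (i + 1)
    else pvExtendHeader (header ++ [name]) (PySem.Set.add ex name) m (i + 1)

-- ===== PORT A =====
-- A's `while START_TOKEN in cell` loop: find first token, find its end, slice out the answer,
-- rebuild the whole cell, repeat.  Fuel (cell length + 1) only makes the recursion structural:
-- each iteration removes one token occurrence, so the fuel is never exhausted.
def pvLoopA : Nat → List Char → List String → (List Char × List String)
  | 0, cell, ans => (cell, ans)
  | f + 1, cell, ans =>
    match pvFindSub pvT cell with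
    | none => (cell, ans)
    | some start =>
      match pvFindSub pvE (cell.drop start) with
      | none => (cell, ans)                                   -- end == -1 : malformed cloze, break
      | some e =>
        let endIdx := start + e
        let answer := String.ofList ((cell.drop (start + 6)).take (endIdx - (start + 6)))
        let cell' := cell.take start ++ pvBLANK ++ cell.drop (endIdx + 2)
        pvLoopA f cell' (ans ++ [answer])

def pvACellStep (acc : List String × List String) (cell : String) : List String × List String :=
  let cs := cell.toList
  if (pvFindSub pvT cs).isSome then
    let r := pvLoopA (cs.length + 1) cs acc.2
    (acc.1 ++ [String.ofList r.1], r.2)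
  else (acc.1 ++ [cell], acc.2)

def pvARowStep (st : List String × PySem.Set String × List (List String)) (row : List String) :
    List String × PySem.Set String × List (List String) :=
  match st with
  | (header, ex, out) =>
    let r := row.foldl pvACellStep ([], [])
    if r.2.isEmpty then (header, ex, out ++ [r.1])
    else
      let p := pvExtendHeader header ex r.2.length 0
      (p.1, p.2, out ++ [r.1 ++ r.2])

def process_cloze_backup (data : List (List String)) : List (List String) :=
  match data with
  | [] => []
  | header :: rows =>
    let r := rows.foldl pvARowStep (header, PySem.Set.ofList header, [])
    r.1 :: r.2.2

-- ===== PORT B =====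
-- B's one-pass scanner: jump to the next token, emit the prefix, the blank and the answer,
-- continue after the token's end; on no/unterminated token emit the remaining suffix.
def pvScanCell (cs : List Char) : List Char × List String :=
  match h1 : pvFindSub pvT cs with
  | none => (cs, [])
  | some start =>
    match pvFindSub pvE (cs.drop (start + 6)) with
    | none => (cs, [])
    | some d =>
      let r := pvScanCell (cs.drop (start + 6 + d + 2))
      (cs.take start ++ pvBLANK ++ r.1, String.ofList ((cs.drop (start + 6)).take d) :: r.2)
termination_by cs.length
decreasing_by
  cases cs with
  | nil => simp [pvFindSub, pvT, List.isPrefixOf] at h1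
  | cons c r => simp

def pvScanCellStr (cell : String) : String × List String :=
  let r := pvScanCell cell.toList
  (String.ofList r.1, r.2)

def pvAltGo : List String → PySem.Set String → List (List String) → (List String × List (List String))
  | header, _, [] => (header, [])
  | header, ex, row :: rest =>
    let scanned := row.map pvScanCellStr
    let answers := (scanned.map Prod.snd).flatten
    let newRow := scanned.map Prod.fst
    if answers.isEmpty then
      let r := pvAltGo header ex rest
      (r.1, newRow :: r.2)
    else
      let p := pvExtendHeader header ex answers.length 0
      let r := pvAltGo p.1 p.2 rest
      (r.1, (newRow ++ answers) :: r.2)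

def process_cloze_backup_alt (data : List (List String)) : List (List String) :=
  match data with
  | [] => []
  | header :: rows =>
    let r := pvAltGo header (PySem.Set.ofList header) rows
    r.1 :: r.2

-- ===== PRECONDITION & SPEC =====
def Spec_process_cloze_backup (data : List (List String)) (out : List (List String)) : Prop := out = process_cloze_backup_alt data
instance (data : List (List String)) (out : List (List String)) : Decidable (Spec_process_cloze_backup data out) := by unfold Spec_process_cloze_backup; infer_instance

-- ===== CLAIM (what is proved, stated in full; the proofs are below) =====
def Claim_equal_process_cloze_backup : Prop := ∀ (data : List (List String)), Dom_process_cloze_backup data → Spec_process_cloze_backup data (process_cloze_backup data)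

-- ===== LEMMAS AND PROOFS =====

lemma pvFindSub_some_prefix {t cs : List Char} {k : Nat} (h : pvFindSub t cs = some k) :
    t.isPrefixOf (cs.drop k) = true := by
  induction cs generalizing k with
  | nil =>
    rw [pvFindSub] at h
    split at h
    · simp_all
    · simp at h
  | cons c r ih =>
    rw [pvFindSub] at h
    cases hp : t.isPrefixOf (c :: r) with
    | true => simp [hp] at h; subst h; simpa using hp
    | false =>
      simp [hp] at h
      obtain ⟨m, hm, rfl⟩ := h
      simpa using ih hm

lemma pvFindSub_some_min {t cs : List Char} {k : Nat} (h : pvFindSub t cs = some k) :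
    ∀ j < k, t.isPrefixOf (cs.drop j) = false := by
  induction cs generalizing k with
  | nil =>
    rw [pvFindSub] at h
    split at h
    · simp_all; omega
    · simp at h
  | cons c r ih =>
    rw [pvFindSub] at h
    cases hp : t.isPrefixOf (c :: r) with
    | true => simp [hp] at h; omega
    | false =>
      simp [hp] at h
      obtain ⟨m, hm, rfl⟩ := h
      intro j hj
      cases j with
      | zero => simpa using hp
      | succ j' => simpa using ih hm j' (by omega)

lemma pvFindSub_append_shift {t : List Char} (pre cs : List Char)
    (h : ∀ i < pre.length, t.isPrefixOf ((pre ++ cs).drop i) = false) :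
    pvFindSub t (pre ++ cs) = (pvFindSub t cs).map (· + pre.length) := by
  induction pre with
  | nil => simp only [List.nil_append]; cases pvFindSub t cs <;> simp
  | cons p pr ih =>
    have h0 : t.isPrefixOf (p :: (pr ++ cs)) = false := by simpa using h 0 (by simp)
    rw [List.cons_append, pvFindSub]
    simp only [h0, Bool.false_eq_true, if_false]
    rw [ih (fun i hi => by simpa using h (i+1) (by simpa using hi))]
    cases pvFindSub t cs <;> simp <;> omega

lemma pvIsPrefixOf_append_left (t u v : List Char) (h : t.length ≤ u.length) :
    t.isPrefixOf (u ++ v) = t.isPrefixOf u := by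
  induction t generalizing u with
  | nil => simp
  | cons a t' ih =>
    cases u with
    | nil => simp at h
    | cons b u' => simp [List.isPrefixOf, ih u' (by simpa using h)]

lemma pvFindSub_E_T_append (x : List Char) :
    pvFindSub pvE (pvT ++ x) = (pvFindSub pvE x).map (· + 6) := by
  rw [pvT]
  simp only [List.cons_append, List.nil_append]
  rw [pvFindSub, pvFindSub, pvFindSub, pvFindSub, pvFindSub, pvFindSub]
  simp [pvE, List.isPrefixOf]

lemma pvNo_T_straddle (u xs : List Char) (h1 : 1 ≤ u.length) (h2 : u.length ≤ 5) :
    pvT.isPrefixOf (u ++ '$' :: xs) = false := by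
  by_contra hc
  have hp : pvT <+: (u ++ '$' :: xs) := by
    rw [← List.isPrefixOf_iff_prefix]
    revert hc; cases (pvT.isPrefixOf (u ++ '$' :: xs)) <;> simp
  obtain ⟨t', ht⟩ := hp
  have hub : u.length < pvT.length := by simp [pvT]; omega
  have e1 := List.getElem_of_eq ht (show u.length < (pvT ++ t').length by simp; omega)
  simp [List.getElem_append, hub] at e1
  have hmem : ('$' : Char) ∈ pvT := e1 ▸ List.getElem_mem _
  simp [pvT] at hmem

lemma pvNo_T_in_blank (j : Nat) (hj : j < 12) (xs : List Char) :
    pvT.isPrefixOf (pvBLANK.drop j ++ xs) = false := by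
  interval_cases j <;> simp [pvBLANK, pvT, List.isPrefixOf]

lemma pvScanCount (cs : List Char) : (pvScanCell cs).2.length ≤ cs.length := by
  fun_induction pvScanCell cs with
  | case1 => simp
  | case2 => simp
  | case3 cs start h1 d h2 r ih =>
    simp [pvScanCell, h1, h2]
    have hr : r = pvScanCell (cs.drop (start + 6 + d + 2)) := rfl
    have hlen : (cs.drop (start + 6 + d + 2)).length ≤ cs.length - 8 := by simp; omega
    have hpos : 0 < cs.length := by
      cases cs with
      | nil => simp [pvFindSub, pvT] at h1
      | cons c r' => simp
    rw [hr]
    omega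

lemma pvNostart_blank (L xs : List Char) (n : Nat) (hn : n ≤ L.length)
    (h : ∀ i < n, pvT.isPrefixOf (L.drop i) = false) :
    ∀ i < n + 12, pvT.isPrefixOf ((L.take n ++ pvBLANK ++ xs).drop i) = false := by
  intro i hi
  have hPlen : (L.take n).length = n := by simp; omega
  by_cases hA : i + 6 ≤ n
  · -- occurrence fully inside the kept prefix
    have hin : i < n := by omega
    have hdrop1 : ((L.take n ++ pvBLANK ++ xs)).drop i = (L.take n).drop i ++ (pvBLANK ++ xs) := by
      rw [List.append_assoc, List.drop_append]
      have : i - (L.take n).length = 0 := by omega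
      simp [this, hPlen, Nat.le_of_lt hin]
    have hdrop2 : L.drop i = (L.take n).drop i ++ L.drop n := by
      rw [← List.drop_append_of_le_length (by rw [hPlen]; omega)]
      simp
    have hl : 6 ≤ ((L.take n).drop i).length := by simp; omega
    rw [hdrop1, pvIsPrefixOf_append_left _ _ _ (by simpa [pvT] using hl)]
    have := h i hin
    rw [hdrop2, pvIsPrefixOf_append_left _ _ _ (by simpa [pvT] using hl)] at this
    exact this
  · by_cases hB : i < n
    · -- straddle : i < n < i + 6
      have hdrop1 : ((L.take n ++ pvBLANK ++ xs)).drop i = (L.take n).drop i ++ (pvBLANK ++ xs) := by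
        rw [List.append_assoc, List.drop_append]
        have : i - (L.take n).length = 0 := by omega
        simp [this, hPlen, Nat.le_of_lt hB]
      rw [hdrop1]
      have hbx : pvBLANK ++ xs = '$' :: (['B','l','a','n','k','s','p','a','c','e','$'] ++ xs) := by
        simp [pvBLANK]
      rw [hbx]
      have hu : ((L.take n).drop i).length = n - i := by rw [List.length_drop, hPlen]
      exact pvNo_T_straddle _ _ (by omega) (by omega)
    · -- occurrence would start inside the blank
      have hge : n ≤ i := by omega
      have hdrop : ((L.take n ++ pvBLANK ++ xs)).drop i = pvBLANK.drop (i - n) ++ xs := by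
        rw [List.append_assoc, List.drop_append, List.drop_append]
        have h1 : (L.take n).drop i = [] := by
          apply List.drop_eq_nil_of_le; omega
        have h2 : i - (L.take n).length - pvBLANK.length = 0 := by simp [hPlen, pvBLANK]; omega
        rw [h1, h2]
        simp [hPlen]
      rw [hdrop]
      exact pvNo_T_in_blank (i - n) (by omega) xs

lemma pvFindSub_some_le {t cs : List Char} {k : Nat} (h : pvFindSub t cs = some k) :
    k ≤ cs.length := by
  induction cs generalizing k with
  | nil => rw [pvFindSub] at h; split at h <;> simp_all
  | cons c r ih =>
    rw [pvFindSub] at h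
    split at h
    · simp at h; omega
    · simp at h
      obtain ⟨m, hm, rfl⟩ := h
      have := ih hm
      simp; omega

lemma pvDecompT {cs : List Char} {start : Nat} (h1 : pvFindSub pvT cs = some start) :
    cs.drop start = pvT ++ cs.drop (start + 6) := by
  have hp := pvFindSub_some_prefix h1
  rw [List.isPrefixOf_iff_prefix] at hp
  obtain ⟨t', ht⟩ := hp
  have h6 : cs.drop (start + 6) = t' := by
    have hc := congrArg (List.drop 6) ht.symm
    rw [List.drop_drop] at hc
    rw [hc]
    simp [pvT]
  rw [h6, ht.symm]

lemma pvLoopA_eq_scan (cs : List Char) : ∀ (pre : List Char) (f : Nat) (acc : List String),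
    (∀ i < pre.length, pvT.isPrefixOf ((pre ++ cs).drop i) = false) →
    (pvScanCell cs).2.length < f →
    pvLoopA f (pre ++ cs) acc = (pre ++ (pvScanCell cs).1, acc ++ (pvScanCell cs).2) := by
  fun_induction pvScanCell cs with
  | case1 cs h1 =>
    intro pre f acc h hf
    simp only [pvScanCell, h1]
    have hshift := pvFindSub_append_shift pre cs h
    rw [h1] at hshift
    simp only [Option.map_none] at hshift
    cases f with
    | zero => simp [pvLoopA]
    | succ f' => simp [pvLoopA, hshift]
  | case2 cs start h1 h2 =>
    intro pre f acc h hf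
    simp only [pvScanCell, h1, h2]
    have hshift := pvFindSub_append_shift pre cs h
    rw [h1] at hshift
    simp only [Option.map_some] at hshift
    have hdrop : (pre ++ cs).drop (start + pre.length) = cs.drop start := by
      rw [Nat.add_comm, List.drop_length_add_append]
    have hE : pvFindSub pvE ((pre ++ cs).drop (start + pre.length)) = none := by
      rw [hdrop, pvDecompT h1, pvFindSub_E_T_append, h2]
      rfl
    cases f with
    | zero => simp [pvLoopA]
    | succ f' => simp [pvLoopA, hshift, hE]
  | case3 cs start h1 d h2 r ih =>
    intro pre f acc h hf
    have hr : r = pvScanCell (cs.drop (start + 6 + d + 2)) := rfl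
    simp only [hr] at hf ⊢
    simp only [List.length_cons] at hf
    have hle : start ≤ cs.length := pvFindSub_some_le h1
    have hshift := pvFindSub_append_shift pre cs h
    rw [h1] at hshift
    simp only [Option.map_some] at hshift
    have hdrop : (pre ++ cs).drop (start + pre.length) = cs.drop start := by
      rw [Nat.add_comm, List.drop_length_add_append]
    have hE : pvFindSub pvE ((pre ++ cs).drop (start + pre.length)) = some (d + 6) := by
      rw [hdrop, pvDecompT h1, pvFindSub_E_T_append, h2]
      rfl
    have e1 : (pre ++ cs).drop (start + pre.length + 6) = cs.drop (start + 6) := by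
      rw [show start + pre.length + 6 = pre.length + (start + 6) by omega, List.drop_length_add_append]
    have e2 : start + pre.length + (d + 6) - (start + pre.length + 6) = d := by omega
    have e3 : (pre ++ cs).take (start + pre.length) = pre ++ cs.take start := by
      rw [Nat.add_comm, List.take_length_add_append]
    have e4 : (pre ++ cs).drop (start + pre.length + (d + 6) + 2) = cs.drop (start + 6 + d + 2) := by
      rw [show start + pre.length + (d + 6) + 2 = pre.length + (start + 6 + d + 2) by omega,
        List.drop_length_add_append]
    have hns : ∀ i < ((pre ++ cs.take start) ++ pvBLANK).length,
        pvT.isPrefixOf ((((pre ++ cs.take start) ++ pvBLANK) ++ cs.drop (start + 6 + d + 2)).drop i) = false := by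
      have hkey := pvNostart_blank (pre ++ cs) (cs.drop (start + 6 + d + 2)) (pre.length + start)
        (by simp; omega)
        (by
          intro i hi
          by_cases hip : i < pre.length
          · exact h i hip
          · have hd2 : (pre ++ cs).drop i = cs.drop (i - pre.length) := by
              conv_lhs => rw [show i = pre.length + (i - pre.length) by omega]
              rw [List.drop_length_add_append]
            rw [hd2]
            exact pvFindSub_some_min h1 (i - pre.length) (by omega))
      have htk : (pre ++ cs).take (pre.length + start) = pre ++ cs.take start :=
        List.take_length_add_append start
      intro i hi
      have hlen2 : ((pre ++ cs.take start) ++ pvBLANK).length = pre.length + start + 12 := by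
        simp [pvBLANK]; omega
      have hx := hkey i (by omega)
      rw [htk] at hx
      simpa [List.append_assoc] using hx
    cases f with
    | zero => omega
    | succ f' =>
    have key := ih ((pre ++ cs.take start) ++ pvBLANK) f'
      (acc ++ [String.ofList ((cs.drop (start + 6)).take d)]) hns (by omega)
    rw [pvLoopA]
    rw [hshift]
    simp only [hE]
    rw [e1, e2, e3, e4]
    rw [show (pre ++ cs.take start) ++ pvBLANK ++ cs.drop (start + 6 + d + 2)
        = ((pre ++ cs.take start) ++ pvBLANK) ++ cs.drop (start + 6 + d + 2) by simp [List.append_assoc]]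
    rw [key]
    simp [List.append_assoc]

lemma pvCell_eq (cell : String) (a1 a2 : List String) :
    pvACellStep (a1, a2) cell = (a1 ++ [(pvScanCellStr cell).1], a2 ++ (pvScanCellStr cell).2) := by
  have hmain := pvLoopA_eq_scan cell.toList [] (cell.toList.length + 1) a2
    (by intro i hi; simp at hi)
    (by have := pvScanCount cell.toList; omega)
  simp only [List.nil_append] at hmain
  have hlen : cell.toList.length = cell.length := by simp
  rw [hlen] at hmain
  unfold pvACellStep pvScanCellStr
  by_cases hc : (pvFindSub pvT cell.toList).isSome
  · simp [hc, hmain]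
  · -- no token: the scanner returns the cell unchanged
    have hnone : pvFindSub pvT cell.toList = none := by
      cases hx : pvFindSub pvT cell.toList
      · rfl
      · simp [hx] at hc
    have hscan : pvScanCell cell.toList = (cell.toList, []) := by
      rw [pvScanCell, hnone]
    simp [hc, hscan]

lemma pvRow_eq (row : List String) : ∀ (c a : List String),
    row.foldl pvACellStep (c, a) =
      (c ++ row.map (fun x => (pvScanCellStr x).1),
       a ++ (row.map (fun x => (pvScanCellStr x).2)).flatten) := by
  induction row with
  | nil => intro c a; simp
  | cons x rs ih =>
    intro c a
    simp only [List.foldl_cons, pvCell_eq]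
    rw [ih]
    simp

lemma pvOuter_eq (rows : List (List String)) : ∀ (h : List String) (ex : PySem.Set String) (out : List (List String)),
    (rows.foldl pvARowStep (h, ex, out)).1 = (pvAltGo h ex rows).1 ∧
    (rows.foldl pvARowStep (h, ex, out)).2.2 = out ++ (pvAltGo h ex rows).2 := by
  induction rows with
  | nil => intro h ex out; simp [pvAltGo]
  | cons row rest ih =>
    intro h ex out
    have hrow := pvRow_eq row [] []
    simp only [List.nil_append] at hrow
    simp only [List.foldl_cons]
    by_cases he : ((row.map (fun x => (pvScanCellStr x).2)).flatten).isEmpty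
    · have hstep : pvARowStep (h, ex, out) row
          = (h, ex, out ++ [row.map (fun x => (pvScanCellStr x).1)]) := by
        unfold pvARowStep; rw [hrow]; simp [he]
      have halt : pvAltGo h ex (row :: rest)
          = ((pvAltGo h ex rest).1, (row.map (fun x => (pvScanCellStr x).1)) :: (pvAltGo h ex rest).2) := by
        rw [pvAltGo]; simp only [List.map_map, Function.comp_def]; simp [he]
      rw [hstep, halt]
      rcases ih h ex (out ++ [row.map fun x => (pvScanCellStr x).1]) with ⟨ha, hb⟩
      exact ⟨ha, by rw [hb]; simp⟩
    · have hstep : pvARowStep (h, ex, out) row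
          = ((pvExtendHeader h ex ((row.map (fun x => (pvScanCellStr x).2)).flatten).length 0).1,
             (pvExtendHeader h ex ((row.map (fun x => (pvScanCellStr x).2)).flatten).length 0).2,
             out ++ [(row.map (fun x => (pvScanCellStr x).1)) ++ (row.map (fun x => (pvScanCellStr x).2)).flatten]) := by
        unfold pvARowStep; rw [hrow]; simp [he]
      have halt : pvAltGo h ex (row :: rest)
          = ((pvAltGo (pvExtendHeader h ex ((row.map (fun x => (pvScanCellStr x).2)).flatten).length 0).1
              (pvExtendHeader h ex ((row.map (fun x => (pvScanCellStr x).2)).flatten).length 0).2 rest).1,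
             ((row.map (fun x => (pvScanCellStr x).1)) ++ (row.map (fun x => (pvScanCellStr x).2)).flatten)
               :: (pvAltGo (pvExtendHeader h ex ((row.map (fun x => (pvScanCellStr x).2)).flatten).length 0).1
                   (pvExtendHeader h ex ((row.map (fun x => (pvScanCellStr x).2)).flatten).length 0).2 rest).2) := by
        rw [pvAltGo]; simp only [List.map_map, Function.comp_def]; simp [he]
      rw [hstep, halt]
      rcases ih (pvExtendHeader h ex ((row.map (fun x => (pvScanCellStr x).2)).flatten).length 0).1
        (pvExtendHeader h ex ((row.map (fun x => (pvScanCellStr x).2)).flatten).length 0).2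
        (out ++ [(row.map (fun x => (pvScanCellStr x).1)) ++ (row.map (fun x => (pvScanCellStr x).2)).flatten]) with ⟨ha, hb⟩
      exact ⟨ha, by rw [hb]; simp⟩

-- ===== VERDICT (by name: the statement is the Claim_ definition above) =====
theorem process_cloze_backup_spec : Claim_equal_process_cloze_backup := by
  intro data _
  unfold Spec_process_cloze_backup process_cloze_backup process_cloze_backup_alt
  cases data with
  | nil => rfl
  | cons header rows =>
    have h := pvOuter_eq rows header (PySem.Set.ofList header) []
    simp only []
    rw [h.1, h.2]
    simp
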